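-- pv_equiv track=rewrite | github.com/Gghosh55/DSA_Assignment16 | Stack8.py | max_absolute_difference
-- ===== SOURCE A (Python) =====
-- def max_absolute_difference(arr):
--     n = len(arr)
--     left_smaller = [0] * n
--     right_smaller = [0] * n
--     stack = []
--
--
--     for i in range(n):
--         while stack and arr[stack[-1]] >= arr[i]:
--             stack.pop()
--         if stack:
--             left_smaller[i] = stack[-1]
--         stack.append(i)
--
--     stack.clear()
--
--
--     for i in range(n - 1, -1, -1):
--         while stack and arr[stack[-1]] >= arr[i]:
--             stack.pop()
--         if stack:
--             right_smaller[i] = stack[-1]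
--         stack.append(i)
--
--     max_difference = 0
--
--
--     for i in range(n):
--         difference = abs(left_smaller[i] - right_smaller[i])
--         max_difference = max(max_difference, difference)
--
--     return max_difference
-- ===== SOURCE B (Python) =====
-- def max_absolute_difference(arr):
--     n = len(arr)
--     best = 0
--     for i in range(n):
--         left = 0
--         for j in range(i - 1, -1, -1):
--             if arr[j] < arr[i]:
--                 left = j
--                 break
--         right = 0
--         for j in range(i + 1, n):
--             if arr[j] < arr[i]:
--                 right = j
--                 break
--         best = max(best, abs(left - right))
--     return best
-- ===== Notes on version B (the rewrite author's own statement) =====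
-- stated objective: simpler
-- what changed: Replaces the two monotonic-stack passes and the two index arrays with direct per-index scans: for each i it scans left and right for the nearest strictly smaller element's index and folds the max of absolute differences in one loop.
import Mathlib
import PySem

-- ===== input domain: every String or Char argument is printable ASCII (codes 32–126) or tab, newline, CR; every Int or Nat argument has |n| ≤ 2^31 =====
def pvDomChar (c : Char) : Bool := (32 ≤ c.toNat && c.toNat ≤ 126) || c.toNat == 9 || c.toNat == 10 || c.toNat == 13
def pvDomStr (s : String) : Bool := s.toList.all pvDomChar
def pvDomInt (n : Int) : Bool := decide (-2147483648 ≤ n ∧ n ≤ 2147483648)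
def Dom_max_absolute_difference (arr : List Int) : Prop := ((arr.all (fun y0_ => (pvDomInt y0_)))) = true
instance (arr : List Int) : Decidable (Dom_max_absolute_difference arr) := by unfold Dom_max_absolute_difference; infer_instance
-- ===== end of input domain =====

-- B replaces the two monotonic-stack passes with direct per-index left/right scans for the
-- nearest strictly smaller element (simpler, more direct code; O(n^2) instead of A's O(n)).

-- arr[j] for an index that is always in range in both programs
def pvA (arr : List Int) (j : Nat) : Int := arr.getD j 0

-- ===== PORT A =====
-- one iteration of A's stack loop (same body for both passes): stack is a List Nat with the
-- head as Python's stack[-1]; the 'while stack and arr[stack[-1]] >= arr[i]: stack.pop()'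
-- is dropWhile
def pvStep (arr : List Int) (st : List Int × List Nat) (i : Nat) : List Int × List Nat :=
  let stack := st.2.dropWhile (fun j => decide (pvA arr i ≤ pvA arr j))
  let sm := match stack with
    | [] => st.1
    | j :: _ => st.1.set i (Int.ofNat j)
  (sm, i :: stack)

def max_absolute_difference (arr : List Int) : Int :=
  let n := arr.length
  let left := ((List.range n).foldl (pvStep arr) (List.replicate n 0, [])).1
  let right := (((List.range n).reverse).foldl (pvStep arr) (List.replicate n 0, [])).1
  (List.range n).foldl (fun md i => max md |left.getD i 0 - right.getD i 0|) 0

-- ===== PORT B =====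
-- 'for j in range(i-1,-1,-1): if arr[j] < arr[i]: left = j; break' with left = 0 initially
def pvLeftScan (arr : List Int) (i : Nat) : Nat :=
  (((List.range i).reverse).find? (fun j => decide (pvA arr j < pvA arr i))).getD 0

-- 'for j in range(i+1,n): if arr[j] < arr[i]: right = j; break' with right = 0 initially
def pvRightScan (arr : List Int) (i : Nat) : Nat :=
  ((List.range' (i+1) (arr.length - (i+1))).find? (fun j => decide (pvA arr j < pvA arr i))).getD 0

def max_absolute_difference_alt (arr : List Int) : Int :=
  (List.range arr.length).foldl
    (fun best i => max best |Int.ofNat (pvLeftScan arr i) - Int.ofNat (pvRightScan arr i)|) 0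

-- ===== PRECONDITION & SPEC =====
def Spec_max_absolute_difference (arr : List Int) (out : Int) : Prop := out = max_absolute_difference_alt arr
instance (arr : List Int) (out : Int) : Decidable (Spec_max_absolute_difference arr out) := by unfold Spec_max_absolute_difference; infer_instance

-- ===== CLAIM (what is proved, stated in full; the proofs are below) =====
def Claim_equal_max_absolute_difference : Prop := ∀ (arr : List Int), Dom_max_absolute_difference arr → Spec_max_absolute_difference arr (max_absolute_difference arr)

-- ===== LEMMAS AND PROOFS =====

-- the stack A's first pass holds after processing indices 0..m-1 (head = Python's stack[-1])
def stkL (arr : List Int) : Nat → List Nat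
  | 0 => []
  | m+1 => m :: (stkL arr m).filter (fun j => decide (pvA arr j < pvA arr m))

-- the stack A's second pass holds after processing indices n-1..n-c
def stkR (arr : List Int) : Nat → List Nat
  | 0 => []
  | c+1 => (arr.length - c - 1) ::
      (stkR arr c).filter (fun j => decide (pvA arr j < pvA arr (arr.length - c - 1)))

theorem pairwise_stkL (arr : List Int) (m : Nat) :
    (stkL arr m).Pairwise (fun u v => pvA arr v < pvA arr u) := by
  induction m with
  | zero => simp [stkL]
  | succ m ih =>
    refine List.Pairwise.cons ?_ (List.Pairwise.filter _ ih)
    intro v hv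
    simpa using List.of_mem_filter hv

theorem pairwise_stkR (arr : List Int) (c : Nat) :
    (stkR arr c).Pairwise (fun u v => pvA arr v < pvA arr u) := by
  induction c with
  | zero => simp [stkR]
  | succ c ih =>
    refine List.Pairwise.cons ?_ (List.Pairwise.filter _ ih)
    intro v hv
    simpa using List.of_mem_filter hv

-- on a stack whose values strictly decrease from the top, the pop loop is a filter
theorem dropWhile_eq_filter (arr : List Int) (x : Int) (l : List Nat)
    (h : l.Pairwise (fun u v => pvA arr v < pvA arr u)) :
    l.dropWhile (fun j => decide (x ≤ pvA arr j)) =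
      l.filter (fun j => decide (pvA arr j < x)) := by
  induction l with
  | nil => rfl
  | cons j t ih =>
    rcases List.pairwise_cons.mp h with ⟨hj, ht⟩
    by_cases hx : x ≤ pvA arr j
    · have h2 : ¬ pvA arr j < x := not_lt.mpr hx
      rw [List.dropWhile_cons_of_pos (by simpa using hx),
        List.filter_cons_of_neg (by simpa using h2), ih ht]
    · have hlt : pvA arr j < x := lt_of_not_ge hx
      have hall : t.filter (fun j => decide (pvA arr j < x)) = t :=
        List.filter_eq_self.mpr (fun v hv => by
          have := hj v hv
          simp only [decide_eq_true_eq]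
          omega)
      rw [List.dropWhile_cons_of_neg (by simpa using hx),
        List.filter_cons_of_pos (by simpa using hlt), hall]

theorem find?_filter' (p q : Nat → Bool) (l : List Nat) :
    (l.filter q).find? p = l.find? (fun x => q x && p x) := by
  induction l with
  | nil => rfl
  | cons x t ih => by_cases h : q x <;> by_cases h2 : p x <;> simp [h, h2, ih]

-- searching the stack for the first value < x finds the same index as scanning all
-- processed indices in processing-reverse order
theorem find_stkL (arr : List Int) (x : Int) (m : Nat) :
    (stkL arr m).find? (fun j => decide (pvA arr j < x)) =
      ((List.range m).reverse).find? (fun j => decide (pvA arr j < x)) := by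
  induction m with
  | zero => rfl
  | succ m ih =>
    rw [List.range_succ, List.reverse_append]
    simp only [List.reverse_cons, List.reverse_nil, List.nil_append, List.cons_append]
    show List.find? _ (m :: _) = List.find? _ (m :: _)
    by_cases h : pvA arr m < x
    · rw [List.find?_cons_of_pos (by simpa using h), List.find?_cons_of_pos (by simpa using h)]
    · rw [List.find?_cons_of_neg (by simpa using h), List.find?_cons_of_neg (by simpa using h),
        find?_filter', ← ih]
      have hpred : (fun j => decide (pvA arr j < pvA arr m) && decide (pvA arr j < x)) =
          (fun j => decide (pvA arr j < x)) := by
        funext j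
        by_cases hj : pvA arr j < x
        · have : pvA arr j < pvA arr m := by omega
          simp [hj, this]
        · simp [hj]
      rw [hpred]

theorem find_stkR (arr : List Int) (x : Int) (c : Nat) (hc : c ≤ arr.length) :
    (stkR arr c).find? (fun j => decide (pvA arr j < x)) =
      (List.range' (arr.length - c) c).find? (fun j => decide (pvA arr j < x)) := by
  induction c with
  | zero => rfl
  | succ c ih =>
    have h1 : arr.length - (c+1) = arr.length - c - 1 := by omega
    have h2 : arr.length - c - 1 + 1 = arr.length - c := by omega
    rw [h1, List.range'_succ, h2]
    show List.find? _ (_ :: _) = List.find? _ (_ :: _)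
    by_cases h : pvA arr (arr.length - c - 1) < x
    · rw [List.find?_cons_of_pos (by simpa using h), List.find?_cons_of_pos (by simpa using h)]
    · rw [List.find?_cons_of_neg (by simpa using h), List.find?_cons_of_neg (by simpa using h),
        find?_filter', ← ih (by omega)]
      have hpred : (fun j => decide (pvA arr j < pvA arr (arr.length - c - 1)) && decide (pvA arr j < x)) =
          (fun j => decide (pvA arr j < x)) := by
        funext j
        by_cases hj : pvA arr j < x
        · have : pvA arr j < pvA arr (arr.length - c - 1) := by omega
          simp [hj, this]
        · simp [hj]
      rw [hpred]

-- the left_smaller array after m steps of A's first pass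
def lsL (arr : List Int) (m : Nat) : List Int :=
  (List.range arr.length).map (fun i => if i < m then Int.ofNat (pvLeftScan arr i) else 0)

-- the right_smaller array after c steps of A's second pass
def lsR (arr : List Int) (c : Nat) : List Int :=
  (List.range arr.length).map (fun i => if arr.length - c ≤ i then Int.ofNat (pvRightScan arr i) else 0)

theorem leftPass (arr : List Int) (m : Nat) (hm : m ≤ arr.length) :
    (List.range m).foldl (pvStep arr) (List.replicate arr.length 0, []) =
      (lsL arr m, stkL arr m) := by
  induction m with
  | zero =>
    simp [lsL, stkL, List.map_const']
  | succ m ih =>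
    rw [List.range_succ, List.foldl_append, ih (by omega), List.foldl_cons, List.foldl_nil]
    have hdrop := dropWhile_eq_filter arr (pvA arr m) (stkL arr m) (pairwise_stkL arr m)
    have hfind : ((stkL arr m).filter (fun j => decide (pvA arr j < pvA arr m))).head? =
        (((List.range m).reverse).find? (fun j => decide (pvA arr j < pvA arr m))) := by
      rw [List.head?_filter, find_stkL]
    unfold pvStep
    simp only [hdrop]
    cases hs : (stkL arr m).filter (fun j => decide (pvA arr j < pvA arr m)) with
    | nil =>
      have hnone : pvLeftScan arr m = 0 := by
        unfold pvLeftScan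
        rw [← hfind, hs]
        rfl
      refine Prod.ext ?_ (by simp only [stkL, hs])
      simp only [lsL]
      apply List.map_congr_left
      intro i hi
      by_cases him : i = m
      · subst him
        simp [hnone]
      · have : i < m ↔ i < m + 1 := by omega
        simp [this]
    | cons j rest =>
      have hsome : pvLeftScan arr m = j := by
        unfold pvLeftScan
        rw [← hfind, hs]
        rfl
      refine Prod.ext ?_ (by simp only [stkL, hs])
      simp only [lsL]
      apply List.ext_getElem
      · simp
      · intro i hi1 hi2
        by_cases him : i = m
        · subst him
          rw [List.getElem_set_self (by simpa using hi1)]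
          simp [hsome]
        · rw [List.getElem_set_ne (by omega)]
          simp only [List.getElem_map, List.getElem_range]
          have : i < m ↔ i < m + 1 := by omega
          simp [this]

theorem rightPass (arr : List Int) (c : Nat) (hc : c ≤ arr.length) :
    ((List.range' (arr.length - c) c).reverse).foldl (pvStep arr)
        (List.replicate arr.length 0, []) = (lsR arr c, stkR arr c) := by
  induction c with
  | zero =>
    simp only [List.range'_zero, List.reverse_nil, List.foldl_nil, lsR, Nat.sub_zero]
    refine Prod.ext ?_ rfl
    show (List.replicate arr.length (0:Int)) = _
    rw [List.map_congr_left (l := List.range arr.length)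
      (f := fun i => if arr.length ≤ i then Int.ofNat (pvRightScan arr i) else 0)
      (g := fun _ => (0:Int))
      (fun i hi => by
        simp only [List.mem_range] at hi
        simp [Nat.not_le.mpr hi])]
    simp [List.map_const']
  | succ c ih =>
    have h1 : arr.length - (c+1) = arr.length - c - 1 := by omega
    have h2 : arr.length - c - 1 + 1 = arr.length - c := by omega
    rw [h1, List.range'_succ, h2, List.reverse_cons, List.foldl_append, ih (by omega),
      List.foldl_cons, List.foldl_nil]
    have hdrop := dropWhile_eq_filter arr (pvA arr (arr.length - c - 1)) (stkR arr c)
      (pairwise_stkR arr c)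
    have hcnt : arr.length - (arr.length - c - 1 + 1) = c := by omega
    have hfind : ((stkR arr c).filter
          (fun j => decide (pvA arr j < pvA arr (arr.length - c - 1)))).head? =
        ((List.range' (arr.length - c - 1 + 1) (arr.length - (arr.length - c - 1 + 1))).find?
          (fun j => decide (pvA arr j < pvA arr (arr.length - c - 1)))) := by
      rw [List.head?_filter, find_stkR arr _ c (by omega), hcnt, h2]
    unfold pvStep
    simp only [hdrop]
    cases hs : (stkR arr c).filter (fun j => decide (pvA arr j < pvA arr (arr.length - c - 1))) with
    | nil =>
      have hnone : pvRightScan arr (arr.length - c - 1) = 0 := by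
        unfold pvRightScan
        rw [← hfind, hs]
        rfl
      refine Prod.ext ?_ (by simp only [stkR, hs])
      simp only [lsR]
      apply List.map_congr_left
      intro k hk
      by_cases hki : k = arr.length - c - 1
      · subst hki
        rw [h1]
        have hc1 : ¬ arr.length - c ≤ arr.length - c - 1 := by omega
        simp [hc1, hnone]
      · have : arr.length - (c+1) ≤ k ↔ arr.length - c ≤ k := by omega
        simp [this]
    | cons j rest =>
      have hsome : pvRightScan arr (arr.length - c - 1) = j := by
        unfold pvRightScan
        rw [← hfind, hs]
        rfl
      refine Prod.ext ?_ (by simp only [stkR, hs])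
      simp only [lsR]
      apply List.ext_getElem
      · simp
      · intro k hk1 hk2
        by_cases hki : k = arr.length - c - 1
        · subst hki
          rw [List.getElem_set_self (by simpa using hk1)]
          simp only [List.getElem_map, List.getElem_range]
          have : arr.length - (c+1) ≤ arr.length - c - 1 := by omega
          simp [this, hsome]
        · rw [List.getElem_set_ne (by omega)]
          simp only [List.getElem_map, List.getElem_range]
          have : arr.length - (c+1) ≤ k ↔ arr.length - c ≤ k := by omega
          simp [this]

theorem getD_lsL (arr : List Int) (i : Nat) (hi : i < arr.length) :
    (lsL arr arr.length).getD i 0 = Int.ofNat (pvLeftScan arr i) := by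
  unfold lsL
  rw [List.getD_eq_getElem?_getD, List.getElem?_eq_getElem (by simpa using hi)]
  simp [hi]

theorem getD_lsR (arr : List Int) (i : Nat) (hi : i < arr.length) :
    (lsR arr arr.length).getD i 0 = Int.ofNat (pvRightScan arr i) := by
  unfold lsR
  rw [List.getD_eq_getElem?_getD, List.getElem?_eq_getElem (by simpa using hi)]
  simp

-- ===== VERDICT (by name: the statement is the Claim_ definition above) =====
theorem max_absolute_difference_spec : Claim_equal_max_absolute_difference := by
  intro arr _
  unfold Spec_max_absolute_difference max_absolute_difference max_absolute_difference_alt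
  simp only
  rw [leftPass arr arr.length le_rfl]
  rw [show (List.range arr.length).reverse =
      (List.range' (arr.length - arr.length) arr.length).reverse from by
    rw [Nat.sub_self, ← List.range_eq_range']]
  rw [rightPass arr arr.length le_rfl]
  apply PySem.List.foldl_congr_mem
  intro acc i hi
  simp only [List.mem_range] at hi
  rw [getD_lsL arr i hi, getD_lsR arr i hi]
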